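-- pv_equiv track=rewrite | github.com/itsmiinos/Data-Structures-And-Algorithms | 3894-MaximizeYsumByPickingATripletOfDistinctXvalues/3894-MaximizeYsumByPickingATripletOfDistinctXvalues.py | maxSumDistinctTriplet
-- ===== SOURCE A (Python) =====
-- import heapq
--
-- def maxSumDistinctTriplet(x, y):
--     max_y_for_x = dict()
--
--     # Track max y for each distinct x
--     for xi, yi in zip(x, y):
--         if xi not in max_y_for_x:
--             max_y_for_x[xi] = yi
--         else:
--             max_y_for_x[xi] = max(max_y_for_x[xi], yi)
--
--     # Not enough distinct x values
--     if len(max_y_for_x) < 3: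
--         return -1
--
--     # Get top 3 largest y-values from distinct x
--     top_y = heapq.nlargest(3, max_y_for_x.values())
--     return sum(top_y)
-- ===== SOURCE B (Python) =====
-- def maxSumDistinctTriplet(x, y):
--     # Sort pairs by y descending; the first pair seen for each x carries that
--     # x's maximum y, so greedily take the first three pairs with fresh x.
--     pairs = sorted(zip(x, y), key=lambda p: p[1], reverse=True)
--     chosen = set()
--     total = 0
--     for xi, yi in pairs:
--         if xi not in chosen:
--             chosen.add(xi)
--             total += yi
--             if len(chosen) == 3:
--                 return total
--     return -1
-- ===== Notes on version B (the rewrite author's own statement) =====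
-- stated objective: alternative
-- what changed: B drops the per-x max dict and the heap entirely: it sorts the (x,y) pairs by y descending and greedily sums the first three pairs with pairwise-distinct x, returning -1 if the scan ends with fewer than three.
import Mathlib
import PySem

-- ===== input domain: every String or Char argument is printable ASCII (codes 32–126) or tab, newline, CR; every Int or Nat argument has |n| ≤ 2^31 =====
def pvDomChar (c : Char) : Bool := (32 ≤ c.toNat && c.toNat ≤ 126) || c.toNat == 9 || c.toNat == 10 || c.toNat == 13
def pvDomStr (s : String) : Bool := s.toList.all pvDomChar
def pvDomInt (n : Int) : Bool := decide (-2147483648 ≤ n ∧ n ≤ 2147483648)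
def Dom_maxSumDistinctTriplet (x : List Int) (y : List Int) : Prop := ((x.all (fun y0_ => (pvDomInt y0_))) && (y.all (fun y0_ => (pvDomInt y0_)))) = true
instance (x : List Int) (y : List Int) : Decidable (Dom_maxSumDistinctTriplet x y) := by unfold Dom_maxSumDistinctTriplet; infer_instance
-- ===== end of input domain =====

-- B drops the per-x max dict and the heap: it sorts the (x,y) pairs by y descending
-- and greedily sums the first three pairs with pairwise-distinct x (objective: alternative).

-- ===== PORT A =====
-- heapq.nlargest(3, vals) is ported by its documented contract sorted(vals, reverse=True)[:3]
def maxSumDistinctTriplet (x : List Int) (y : List Int) : Int :=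
  let d := (List.zip x y).foldl
    (fun d p =>
      match d.get? p.1 with            -- 'if xi not in max_y_for_x'
      | none => d.insert p.1 p.2
      | some o => d.insert p.1 (max o p.2)) PySem.Dict.empty
  if d.size < 3 then -1
  else ((PySem.List.sorted (PySem.Dict.values d) (fun v => v) true).take 3).sum

-- ===== PORT B =====
-- the 'for xi, yi in pairs' loop with its early 'return total'
def pvGreedy : List (Int × Int) → PySem.Set Int → Int → Int
  | [], _, _ => -1
  | p :: rest, chosen, total =>
    if PySem.Set.contains chosen p.1 then pvGreedy rest chosen total
    else
      let chosen' := PySem.Set.add chosen p.1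
      let total' := total + p.2
      if PySem.Set.len chosen' == 3 then total' else pvGreedy rest chosen' total'

def maxSumDistinctTriplet_alt (x : List Int) (y : List Int) : Int :=
  let pairs := PySem.List.sorted (List.zip x y) (fun p => p.2) true
  pvGreedy pairs PySem.Set.empty 0

-- ===== PRECONDITION & SPEC =====
def Spec_maxSumDistinctTriplet (x : List Int) (y : List Int) (out : Int) : Prop := out = maxSumDistinctTriplet_alt x y
instance (x : List Int) (y : List Int) (out : Int) : Decidable (Spec_maxSumDistinctTriplet x y out) := by unfold Spec_maxSumDistinctTriplet; infer_instance

-- ===== CLAIM (what is proved, stated in full; the proofs are below) =====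
def Claim_equal_maxSumDistinctTriplet : Prop := ∀ (x : List Int) (y : List Int), Dom_maxSumDistinctTriplet x y → Spec_maxSumDistinctTriplet x y (maxSumDistinctTriplet x y)

-- ===== LEMMAS AND PROOFS =====

-- the values B's loop would pick with no early stop, and the keys it picks them at
def pvTaken : List (Int × Int) → PySem.Set Int → List Int
  | [], _ => []
  | p :: rest, seen =>
    if PySem.Set.contains seen p.1 then pvTaken rest seen
    else p.2 :: pvTaken rest (PySem.Set.add seen p.1)

def pvKeys : List (Int × Int) → PySem.Set Int → List Int
  | [], _ => []
  | p :: rest, seen =>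
    if PySem.Set.contains seen p.1 then pvKeys rest seen
    else p.1 :: pvKeys rest (PySem.Set.add seen p.1)

-- value at the first occurrence of key k
def pvFirst? (k : Int) : List (Int × Int) → Option Int
  | [] => none
  | p :: r => if p.1 = k then some p.2 else pvFirst? k r

-- running max of the values at key k (what A's dict holds at k)
def pvMaxFrom (o : Option Int) (k : Int) (L : List (Int × Int)) : Option Int :=
  L.foldl (fun a p => if p.1 = k then some (match a with | none => p.2 | some v => max v p.2) else a) o

-- A's dict-building step, in modify form
def pvStep (d : PySem.Dict Int Int) (p : Int × Int) : PySem.Dict Int Int :=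
  d.modify p.1 p.2 (fun o => max o p.2)

theorem pvGreedy_eq_taken (L : List (Int × Int)) :
    ∀ (chosen : PySem.Set Int) (total : Int), chosen.length ≤ 2 →
    pvGreedy L chosen total =
      if 3 ≤ chosen.length + (pvTaken L chosen).length
      then total + ((pvTaken L chosen).take (3 - chosen.length)).sum
      else -1 := by
  induction L with
  | nil =>
    intro chosen total h
    simp [pvGreedy, pvTaken]
    intro h3; omega
  | cons p rest ih =>
    intro chosen total hle
    by_cases hc : p.1 ∈ chosen
    · simp [pvGreedy, pvTaken, hc, ih chosen total hle]
    · have hadd : PySem.Set.add chosen p.1 = chosen ++ [p.1] := by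
        simp [PySem.Set.add, hc]
      by_cases h3 : chosen.length = 2
      · simp [pvGreedy, pvTaken, hc, h3, PySem.Set.len]
        intro h; exact absurd h (by omega)
      · have hle' : (PySem.Set.add chosen p.1).length ≤ 2 := by
          simp [hadd]; omega
        have := ih (PySem.Set.add chosen p.1) (total + p.2) hle'
        simp only [pvGreedy, pvTaken] at *
        simp [hc, PySem.Set.len, show ¬((chosen.length : Int) + 1 = 3) by omega]
        rw [show (3 - chosen.length) = (3 - (chosen.length + 1)) + 1 by omega]
        simp [List.take_succ_cons]
        split_ifs <;> simp_all <;> omega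

theorem mem_pvKeys (L : List (Int × Int)) : ∀ (seen : PySem.Set Int) (k : Int),
    k ∈ pvKeys L seen ↔ k ∈ L.map Prod.fst ∧ k ∉ seen := by
  induction L with
  | nil => intro seen k; simp [pvKeys]
  | cons p rest ih =>
    intro seen k
    by_cases hc : p.1 ∈ seen
    · simp [pvKeys, hc, ih]
      intro h1 h2; subst h2; exact absurd hc h1
    · have hadd : PySem.Set.add seen p.1 = seen ++ [p.1] := by simp [PySem.Set.add, hc]
      simp [pvKeys, hc, ih]
      constructor
      · rintro (rfl | ⟨h1, h2, h3⟩)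
        · exact ⟨Or.inl rfl, hc⟩
        · exact ⟨Or.inr h1, h2⟩
      · rintro ⟨h1 | h1, h2⟩
        · exact Or.inl h1
        · by_cases hk : k = p.1
          · exact Or.inl hk
          · exact Or.inr ⟨h1, h2, hk⟩

theorem nodup_pvKeys (L : List (Int × Int)) : ∀ (seen : PySem.Set Int), (pvKeys L seen).Nodup := by
  induction L with
  | nil => intro seen; simp [pvKeys]
  | cons p rest ih =>
    intro seen
    by_cases hc : p.1 ∈ seen
    · simp [pvKeys, hc, ih]
    · have hadd : PySem.Set.add seen p.1 = seen ++ [p.1] := by simp [PySem.Set.add, hc]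
      have hni : p.1 ∉ pvKeys rest (PySem.Set.add seen p.1) := by
        intro hmem
        have := ((mem_pvKeys rest _ p.1).mp hmem).2
        simp [hadd] at this
      simp [pvKeys, hc]
      exact ⟨fun h => absurd (hadd ▸ h) hni, hadd ▸ ih _⟩

theorem pvTaken_eq_map (L : List (Int × Int)) : ∀ (seen : PySem.Set Int),
    pvTaken L seen = (pvKeys L seen).map (fun k => (pvFirst? k L).getD 0) := by
  induction L with
  | nil => intro seen; simp [pvTaken, pvKeys]
  | cons p rest ih =>
    intro seen
    by_cases hc : p.1 ∈ seen
    · simp only [pvTaken, pvKeys, PySem.Set.contains_eq_listContains,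
        List.contains_iff_mem, if_pos hc]
      rw [ih]
      refine List.map_congr_left ?_
      intro k hk
      have := ((mem_pvKeys rest seen k).mp hk).2
      have hne : ¬ p.1 = k := fun h => this (h ▸ hc)
      simp [pvFirst?, hne]
    · have hadd : PySem.Set.add seen p.1 = seen ++ [p.1] := by simp [PySem.Set.add, hc]
      simp only [pvTaken, pvKeys, PySem.Set.contains_eq_listContains,
        List.contains_iff_mem, if_neg hc, List.map_cons]
      congr 1
      · simp [pvFirst?]
      · rw [ih]
        refine List.map_congr_left ?_
        intro k hk
        have := ((mem_pvKeys rest _ k).mp hk).2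
        have hne : ¬ p.1 = k := by
          intro h; subst h
          exact this (by simp [hadd])
        simp [pvFirst?, hne]

theorem pvTaken_sublist (L : List (Int × Int)) : ∀ (seen : PySem.Set Int),
    (pvTaken L seen).Sublist (L.map Prod.snd) := by
  induction L with
  | nil => intro seen; simp [pvTaken]
  | cons p rest ih =>
    intro seen
    simp only [pvTaken, List.map_cons]
    split_ifs
    · exact (ih seen).cons _
    · exact (ih _).cons₂ _

theorem dict_get? (L : List (Int × Int)) : ∀ (d : PySem.Dict Int Int) (k : Int),
    (L.foldl pvStep d).get? k = pvMaxFrom (d.get? k) k L := by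
  induction L with
  | nil => intro d k; simp [pvMaxFrom]
  | cons p rest ih =>
    intro d k
    simp only [List.foldl_cons]
    rw [ih]
    have hstep : (pvStep d p).get? k
        = if p.1 = k then some (match d.get? k with | none => p.2 | some v => max v p.2) else d.get? k := by
      simp only [pvStep, PySem.Dict.modify, PySem.Dict.get?_insert, PySem.Dict.getD_eq_get?_getD]
      by_cases hk : p.1 = k
      · subst hk
        rcases h : d.get? p.1 with _ | v <;> simp [max_self]
      · rw [if_neg (Ne.symm hk), if_neg hk]
    rw [hstep]
    simp only [pvMaxFrom, List.foldl_cons]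

theorem pvMaxFrom_const (k : Int) (v : Int) (L : List (Int × Int)) (h : ∀ q ∈ L, q.2 ≤ v) :
    pvMaxFrom (some v) k L = some v := by
  induction L with
  | nil => simp [pvMaxFrom]
  | cons q rest ih =>
    simp only [pvMaxFrom, List.foldl_cons] at *
    have hq : q.2 ≤ v := h q (List.mem_cons_self ..)
    by_cases hk : q.1 = k
    · simp only [if_pos hk, max_eq_left hq]
      exact ih (fun r hr => h r (List.mem_cons_of_mem _ hr))
    · simp only [if_neg hk]
      exact ih (fun r hr => h r (List.mem_cons_of_mem _ hr))

theorem pvFirst_eq_max (S : List (Int × Int)) (hp : S.Pairwise (fun a b => b.2 ≤ a.2)) :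
    ∀ k, k ∈ S.map Prod.fst → pvFirst? k S = pvMaxFrom none k S := by
  induction S with
  | nil => intro k hk; simp at hk
  | cons p rest ih =>
    intro k hk
    rcases List.pairwise_cons.mp hp with ⟨hhead, htail⟩
    by_cases hpk : p.1 = k
    · simp only [pvFirst?, pvMaxFrom, List.foldl_cons, if_pos hpk]
      exact (pvMaxFrom_const k p.2 rest hhead).symm
    · simp only [pvFirst?, pvMaxFrom, List.foldl_cons, if_neg hpk]
      apply ih htail
      simp at hk ⊢
      rcases hk with h | h
      · exact absurd h.symm hpk
      · exact h

theorem pvMaxFrom_perm (k : Int) {S L : List (Int × Int)} (h : S.Perm L) :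
    pvMaxFrom none k S = pvMaxFrom none k L := by
  unfold pvMaxFrom
  refine h.foldl_eq' ?_ none
  intro p _ q _ z
  by_cases hp : p.1 = k <;> by_cases hq : q.1 = k <;>
    rcases z with _ | v <;>
    simp [hp, hq, max_comm, max_left_comm]

theorem dict_keys_step (d : PySem.Dict Int Int) (p : Int × Int) :
    (pvStep d p).keys = PySem.Set.add d.keys p.1 := by
  unfold pvStep
  rw [PySem.Dict.keys_modify]
  by_cases hc : d.contains p.1 = true
  · rw [PySem.Dict.keys_insert_of_contains _ _ hc]
    have : p.1 ∈ d.keys := (PySem.Dict.contains_iff_mem_keys d p.1).mp hc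
    simp [PySem.Set.add, this]
  · rw [PySem.Dict.keys_insert_of_not_contains _ _ (by simpa using hc)]
    have : p.1 ∉ d.keys := fun h => hc ((PySem.Dict.contains_iff_mem_keys d p.1).mpr h)
    simp [PySem.Set.add, this]

theorem dict_keys (L : List (Int × Int)) : ∀ (d : PySem.Dict Int Int),
    (L.foldl pvStep d).keys = PySem.Set.update d.keys (L.map Prod.fst) := by
  induction L with
  | nil => intro d; simp [PySem.Set.update]
  | cons p rest ih =>
    intro d
    simp only [List.foldl_cons, List.map_cons, PySem.Set.update, ih, dict_keys_step]

theorem dict_keys_empty (L : List (Int × Int)) :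
    (L.foldl pvStep PySem.Dict.empty).keys = PySem.Set.ofList (L.map Prod.fst) := by
  rw [dict_keys, PySem.Dict.keys_empty, PySem.Set.update_nil_left]

-- ===== VERDICT (by name: the statement is the Claim_ definition above) =====
theorem maxSumDistinctTriplet_spec : Claim_equal_maxSumDistinctTriplet := by
  intro x y _
  unfold Spec_maxSumDistinctTriplet maxSumDistinctTriplet maxSumDistinctTriplet_alt
  have hstep : (fun (d : PySem.Dict Int Int) (p : Int × Int) =>
      match d.get? p.1 with
      | none => d.insert p.1 p.2
      | some o => d.insert p.1 (max o p.2)) = pvStep := by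
    funext d p
    unfold pvStep
    rcases h : d.get? p.1 with _ | o <;>
      simp [PySem.Dict.modify, PySem.Dict.getD_eq_get?_getD, h, max_self]
  rw [hstep]
  set L := List.zip x y with hL
  set d := L.foldl pvStep PySem.Dict.empty with hd
  set S := PySem.List.sorted L (fun p : Int × Int => p.2) true with hS
  have hSL : S.Perm L := PySem.List.sorted_perm _ _ _
  have hknd : d.keys.Nodup := by
    rw [hd, dict_keys_empty]; exact PySem.Set.nodup_ofList _
  have hget : ∀ k, d.get? k = pvMaxFrom none k L := by
    intro k; rw [hd, dict_get?, PySem.Dict.get?_empty]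
  have hvals : d.values = d.keys.map (fun k => (pvMaxFrom none k L).getD 0) := by
    rw [PySem.Dict.values_eq_map_keys d hknd 0]
    exact List.map_congr_left (fun k _ => by rw [PySem.Dict.getD_eq_get?_getD, hget k])
  have hpair : S.Pairwise (fun a b => b.2 ≤ a.2) := PySem.List.sorted_pairwise_rev L _
  have htaken : pvTaken S [] = (pvKeys S []).map (fun k => (pvMaxFrom none k L).getD 0) := by
    rw [pvTaken_eq_map]
    refine List.map_congr_left (fun k hk => ?_)
    have hkS : k ∈ S.map Prod.fst := ((mem_pvKeys S [] k).mp hk).1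
    rw [pvFirst_eq_max S hpair k hkS, pvMaxFrom_perm k hSL]
  have hkperm : (pvKeys S []).Perm d.keys := by
    rw [hd, dict_keys_empty]
    refine (List.perm_ext_iff_of_nodup (nodup_pvKeys S []) (PySem.Set.nodup_ofList _)).mpr ?_
    intro k
    rw [mem_pvKeys, PySem.Set.mem_ofList]
    simp [(hSL.map Prod.fst).mem_iff]
  have hperm : (pvTaken S []).Perm d.values := by
    rw [htaken, hvals]; exact hkperm.map _
  set V := PySem.List.sorted (PySem.Dict.values d) (fun v => v) true with hV
  have hVperm : (pvTaken S []).Perm V := hperm.trans (PySem.List.sorted_perm _ _ _).symm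
  have hVpair : V.Pairwise (fun a b : Int => b ≤ a) := PySem.List.sorted_pairwise_rev _ _
  have htpair : (pvTaken S []).Pairwise (fun a b : Int => b ≤ a) :=
    List.Pairwise.sublist (pvTaken_sublist S [])
      (by rw [List.pairwise_map]; exact hpair)
  have heq : pvTaken S [] = V :=
    PySem.List.eq_of_perm_of_pairwise_le_of_injective (fun v : Int => -v) neg_injective hVperm
      (htpair.imp (by intro a b h; exact neg_le_neg h)) (hVpair.imp (by intro a b h; exact neg_le_neg h))
  have hG := pvGreedy_eq_taken S ([] : PySem.Set Int) 0 (by simp)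
  have hlen : (pvTaken S []).length = d.size := by
    rw [heq, hV, PySem.List.length_sorted]
    simp [PySem.Dict.values, PySem.Dict.size]
  have hEmpty : (PySem.Set.empty : PySem.Set Int) = ([] : List Int) := rfl
  have hlenV : V.length = d.size := by rw [← heq, hlen]
  rw [hEmpty, hG]
  simp only [List.length_nil, heq, zero_add]
  by_cases h3 : d.size < 3
  · rw [if_pos h3, if_neg (by simp [hlenV]; omega)]
  · rw [if_neg h3, if_pos (by simp [hlenV]; omega)]
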